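-- pv_equiv track=rewrite | github.com/MuMuTuWu/BacktestAgent | src/utils/json_parsing.py | _find_last_json_object
-- ===== SOURCE A (Python) =====
-- def _find_last_json_object(text: str) -> str | None:
--     """
--     从文本中查找最后一个完整的JSON对象
--
--     通过从右往左扫描找到配对的大括号。
--     """
--     # 从右往左找到最后一个}
--     last_brace = text.rfind("}")
--     if last_brace == -1:
--         return None
--
--     # 从该位置往左查找对应的{
--     brace_count = 0
--     for i in range(last_brace, -1, -1):
--         if text[i] == "}":
--             brace_count += 1
--         elif text[i] == "{":
--             brace_count -= 1
--             if brace_count == 0: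
--                 return text[i:last_brace + 1]
--
--     return None
-- ===== SOURCE B (Python) =====
-- def _find_last_json_object(text: str) -> str | None:
--     """Forward single pass with a stack of indices of unmatched opening braces
--     (instead of A's backward counting scan from the last closing brace)."""
--     last_brace = text.rfind("}")
--     if last_brace == -1:
--         return None
--     stack = []
--     for i, ch in enumerate(text[:last_brace]):
--         if ch == "{":
--             stack.append(i)
--         elif ch == "}" and stack:
--             stack.pop()
--     if not stack:
--         return None
--     return text[stack[-1]:last_brace + 1]
-- ===== Notes on version B (the rewrite author's own statement) =====
-- stated objective: alternative
-- what changed: Replaces A's backward counter scan from the last closing brace by a single forward pass that maintains a stack of indices of unmatched opening braces over the prefix before that position, returning the slice from the stack top.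
import Mathlib
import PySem

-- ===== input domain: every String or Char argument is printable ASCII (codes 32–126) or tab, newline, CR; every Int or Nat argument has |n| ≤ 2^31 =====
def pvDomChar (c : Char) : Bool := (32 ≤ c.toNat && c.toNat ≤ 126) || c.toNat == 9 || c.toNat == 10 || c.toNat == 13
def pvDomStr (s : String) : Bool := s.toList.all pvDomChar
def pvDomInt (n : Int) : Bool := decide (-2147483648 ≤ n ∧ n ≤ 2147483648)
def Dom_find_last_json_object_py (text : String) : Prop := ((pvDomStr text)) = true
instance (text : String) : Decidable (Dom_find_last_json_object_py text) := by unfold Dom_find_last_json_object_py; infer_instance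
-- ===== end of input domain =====

-- B replaces A's backward counting scan from the last closing brace by a forward pass
-- with a stack of indices of unmatched opening braces (alternative decomposition, same O(n) cost).


-- ===== PORT A =====
-- the 'for i in range(last_brace, -1, -1)' loop of A, with early return;
-- the 'none' on a failed text[i] lookup is unreachable (every i in the range is in bounds)
def pvALoop (text : String) (last_brace : Int) : List Int → Int → Option String
  | [], _ => none
  | i :: rest, brace_count =>
    match PySem.Str.pyGet? text i with
    | none => none
    | some ch =>
      if ch = '}' then pvALoop text last_brace rest (brace_count + 1)
      else if ch = '{' then
        if brace_count - 1 = 0 then some (PySem.Str.slice text (some i) (some (last_brace + 1)))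
        else pvALoop text last_brace rest (brace_count - 1)
      else pvALoop text last_brace rest brace_count

def find_last_json_object_py (text : String) : Option String :=
  let last_brace := PySem.Str.rfind text "}"
  if last_brace = -1 then none
  else pvALoop text last_brace (PySem.List.pyRange last_brace (-1) (-1)) 0

-- ===== PORT B =====
-- one step of B's forward loop: push the index of an opening brace, pop on a closing one if the stack is nonempty
def pvBStep (st : List Int) (p : Int × Char) : List Int :=
  if p.2 = '{' then st ++ [p.1]
  else if p.2 = '}' && !st.isEmpty then st.dropLast
  else st

def find_last_json_object_py_alt (text : String) : Option String :=
  let last_brace := PySem.Str.rfind text "}"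
  if last_brace = -1 then none
  else
    let stack := (PySem.List.enumerate (PySem.Str.slice text none (some last_brace)).toList 0).foldl pvBStep []
    match stack.getLast? with
    | none => none
    | some s => some (PySem.Str.slice text (some s) (some (last_brace + 1)))

-- ===== PRECONDITION & SPEC =====
def Spec_find_last_json_object_py (text : String) (out : Option String) : Prop := out = find_last_json_object_py_alt text
instance (text : String) (out : Option String) : Decidable (Spec_find_last_json_object_py text out) := by unfold Spec_find_last_json_object_py; infer_instance

-- ===== CLAIM (what is proved, stated in full; the proofs are below) =====
def Claim_equal_find_last_json_object_py : Prop := ∀ (text : String), Dom_find_last_json_object_py text → Spec_find_last_json_object_py text (find_last_json_object_py text)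

-- ===== LEMMAS AND PROOFS =====

-- proof-side model of B's stack, built by consing (newest on top), with a running position
def pvSStep (s : Nat × List Nat) (ch : Char) : Nat × List Nat :=
  (s.1 + 1, if ch = '{' then s.1 :: s.2 else if ch = '}' then s.2.tail else s.2)

def pvStackOf (p : List Char) : Nat × List Nat := p.foldl pvSStep (0, [])

-- proof-side model of A's backward scan, on the reversed segment, returning the index found
def pvBackScanR : List Char → Int → Option Nat
  | [], _ => none
  | ch :: rest, k =>
    if ch = '}' then pvBackScanR rest (k + 1)
    else if ch = '{' then
      if k - 1 = 0 then some rest.length else pvBackScanR rest (k - 1)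
    else pvBackScanR rest k

lemma pvStackOf_fst (p : List Char) : ∀ (n : Nat) (st : List Nat), (p.foldl pvSStep (n, st)).1 = n + p.length := by
  induction p with
  | nil => intro n st; simp
  | cons c p ih =>
    intro n st
    rw [List.foldl_cons,
      show pvSStep (n, st) c = (n + 1, if c = '{' then n :: st else if c = '}' then st.tail else st) from rfl,
      ih]
    simp only [List.length_cons]
    omega

-- core: A's backward count-scan on the reversed prefix returns the (k-1)-th stack element from the top
lemma pvBackScanR_eq_stack (r : List Char) : ∀ (k : Int), 1 ≤ k →
    pvBackScanR r k = (pvStackOf r.reverse).2[(k - 1).toNat]? := by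
  induction r with
  | nil => intro k hk; simp [pvBackScanR, pvStackOf]
  | cons ch rest ih =>
    intro k hk
    have hrev : (ch :: rest).reverse = rest.reverse ++ [ch] := by simp
    have hfold : pvStackOf (rest.reverse ++ [ch]) = pvSStep (pvStackOf rest.reverse) ch := by
      simp [pvStackOf, List.foldl_append]
    by_cases h1 : ch = '}'
    · subst h1
      rw [hrev, hfold]
      simp only [pvBackScanR, pvSStep]
      rw [ih (k + 1) (by omega)]
      have h2 : (k + 1 - 1).toNat = (k - 1).toNat + 1 := by omega
      rw [h2]
      simp [List.getElem?_tail]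
    · by_cases h2 : ch = '{'
      · subst h2
        rw [hrev, hfold]
        have hfst : (pvStackOf rest.reverse).1 = rest.length := by
          rw [pvStackOf, pvStackOf_fst rest.reverse 0 []]
          simp
        by_cases hk1 : k - 1 = 0
        · have hk' : k = 1 := by omega
          subst hk'
          simp [pvBackScanR, pvSStep, hfst]
        · rw [show pvBackScanR ('{' :: rest) k
                = if k - 1 = 0 then some rest.length else pvBackScanR rest (k - 1) from by
              simp [pvBackScanR],
            if_neg hk1, ih (k - 1) (by omega)]
          simp only [pvSStep, hfst]
          have h3 : (k - 1).toNat = (k - 1 - 1).toNat + 1 := by omega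
          rw [h3]
          simp [List.getElem?_cons_succ]
      · rw [hrev, hfold]
        simp only [pvBackScanR, if_neg h1, if_neg h2, pvSStep]
        rw [ih k hk]

-- A's range loop from index i with count k computes the backward scan of the reversed prefix take (i+1)
lemma pvALoop_eq (text : String) (last : Int) : ∀ (i : Nat) (k : Int), 1 ≤ k → i < text.toList.length →
    pvALoop text last (PySem.List.pyRange (i : Int) (-1) (-1)) k
      = (pvBackScanR ((text.toList.take (i + 1)).reverse) k).map
          (fun s : Nat => PySem.Str.slice text (some (s : Int)) (some (last + 1))) := by
  intro i
  induction i with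
  | zero =>
    intro k hk hi
    have hget : PySem.List.pyGet? text.toList 0 = some (text.toList[0]'hi) := by
      simp [PySem.List.pyGet?_zero, List.getElem?_eq_getElem hi]
    have htake : (text.toList.take (0 + 1)).reverse = [text.toList[0]'hi] := by
      rw [List.take_add_one]
      simp [List.getElem?_eq_getElem hi]
    rw [show PySem.List.pyRange ((0 : Nat) : Int) (-1) (-1) = [((0 : Nat) : Int)] from by
        rw [PySem.List.pyRange_neg_one_cons (by norm_num)]
        norm_num [PySem.List.pyRange_neg_one_eq_nil],
      htake]
    by_cases h1 : text.toList[0]'hi = '}'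
    · simp [pvALoop, pvBackScanR, hget, h1]
    · by_cases h2 : text.toList[0]'hi = '{'
      · by_cases hk1 : k - 1 = 0
        · simp [pvALoop, pvBackScanR, hget, h2, hk1]
        · simp [pvALoop, pvBackScanR, hget, h2, hk1]
      · simp [pvALoop, pvBackScanR, hget, h1, h2]
  | succ i ih =>
    intro k hk hi
    have hi' : i < text.toList.length := by omega
    have hget : PySem.List.pyGet? text.toList (((i + 1 : Nat)) : Int) = some (text.toList[i + 1]'hi) := by
      rw [PySem.List.pyGet?_natCast]
      simp [List.getElem?_eq_getElem hi]
    have htake : (text.toList.take (i + 1 + 1)).reverse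
        = (text.toList[i + 1]'hi) :: (text.toList.take (i + 1)).reverse := by
      rw [List.take_add_one]
      simp [List.getElem?_eq_getElem hi]
    rw [show PySem.List.pyRange (((i + 1 : Nat)) : Int) (-1) (-1)
          = (((i + 1 : Nat)) : Int) :: PySem.List.pyRange ((i : Nat) : Int) (-1) (-1) from by
        rw [PySem.List.pyRange_neg_one_cons (by push_cast; omega)]
        norm_num,
      htake]
    simp only [pvALoop, PySem.Str.pyGet?_eq, PySem.Chars.pyGet?_eq_listPyGet?, hget]
    by_cases h1 : text.toList[i + 1]'hi = '}'
    · rw [if_pos h1]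
      simp only [pvBackScanR, if_pos h1]
      exact ih (k + 1) (by omega) hi'
    · by_cases h2 : text.toList[i + 1]'hi = '{'
      · rw [if_neg h1, if_pos h2]
        simp only [pvBackScanR, if_neg h1, if_pos h2]
        by_cases hk1 : k - 1 = 0
        · rw [if_pos hk1, if_pos hk1]
          have hlen : ((text.toList.take (i + 1)).reverse).length = i + 1 := by
            rw [List.length_reverse, List.length_take]
            exact Nat.min_eq_left (by omega)
          rw [hlen]
          simp
        · rw [if_neg hk1, if_neg hk1]
          exact ih (k - 1) (by omega) hi'
      · rw [if_neg h1, if_neg h2]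
        simp only [pvBackScanR, if_neg h1, if_neg h2]
        exact ih k hk hi'

-- B's foldl stack over the enumerated prefix is the reversed cons-stack (as Int indices)
lemma pvBStack_eq (p : List Char) : ∀ (n : Nat) (st : List Nat),
    (PySem.List.enumerate p (n : Int)).foldl pvBStep (st.reverse.map (fun x => (x : Int)))
      = ((p.foldl pvSStep (n, st)).2.reverse.map (fun x => (x : Int))) := by
  induction p with
  | nil => intro n st; simp [PySem.List.enumerate_nil]
  | cons ch p ih =>
    intro n st
    rw [PySem.List.enumerate_cons, List.foldl_cons, List.foldl_cons,
      show pvSStep (n, st) ch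
        = (n + 1, if ch = '{' then n :: st else if ch = '}' then st.tail else st) from rfl]
    by_cases h1 : ch = '{'
    · rw [show pvBStep (st.reverse.map (fun x => (x : Int))) ((n : Int), ch)
          = st.reverse.map (fun x => (x : Int)) ++ [(n : Int)] from by simp [pvBStep, h1]]
      rw [if_pos h1,
        show st.reverse.map (fun x => (x : Int)) ++ [(n : Int)]
          = (n :: st).reverse.map (fun x => (x : Int)) from by simp,
        show ((n : Int) + 1) = (((n + 1 : Nat)) : Int) from by push_cast; ring]
      exact ih (n + 1) (n :: st)
    · by_cases h2 : ch = '}'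
      · rw [if_neg h1, if_pos h2]
        subst h2
        have hstep : pvBStep (st.reverse.map (fun x => (x : Int))) ((n : Int), '}')
            = st.tail.reverse.map (fun x => (x : Int)) := by
          cases st with
          | nil => simp [pvBStep]
          | cons a t => simp [pvBStep]
        rw [hstep,
          show ((n : Int) + 1) = (((n + 1 : Nat)) : Int) from by push_cast; ring]
        exact ih (n + 1) st.tail
      · rw [if_neg h1, if_neg h2,
          show pvBStep (st.reverse.map (fun x => (x : Int))) ((n : Int), ch)
            = st.reverse.map (fun x => (x : Int)) from by simp [pvBStep, h1, h2],
          show ((n : Int) + 1) = (((n + 1 : Nat)) : Int) from by push_cast; ring]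
        exact ih (n + 1) st

-- the index rfind returns: either -1 and no occurrence, or the last occurrence
-- a one-char pattern is a prefix of drop j exactly when l[j] is that char
lemma pvOnePrefix (l : List Char) (c : Char) (j : Nat) :
    ([c].isPrefixOf (l.drop j)) = true ↔ l[j]? = some c := by
  rw [List.isPrefixOf_iff_prefix]
  cases h : l.drop j with
  | nil =>
    have : l[j]? = none := by
      have h0 : (l.drop j)[0]? = l[j + 0]? := List.getElem?_drop
      rw [h] at h0
      simpa using h0.symm
    simp [this]
  | cons a t =>
    have : l[j]? = some a := by
      have h0 : (l.drop j)[0]? = l[j + 0]? := List.getElem?_drop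
      rw [h] at h0
      simpa using h0.symm
    rw [this]
    constructor
    · intro hp
      rcases (List.cons_prefix_cons.mp hp) with ⟨h1, _⟩
      simp [h1]
    · intro he
      exact List.cons_prefix_cons.mpr ⟨(Option.some.injEq _ _ ▸ he).symm ▸ rfl, by simp⟩

lemma pvRfindGo_spec (l : List Char) (c : Char) : ∀ (j : Nat),
    (PySem.Chars.rfind.go l [c] j = -1 ∧ ∀ i : Nat, i ≤ j → l[i]? ≠ some c)
    ∨ (∃ r : Nat, PySem.Chars.rfind.go l [c] j = (r : Int) ∧ r ≤ j ∧ l[r]? = some c) := by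
  intro j
  induction j with
  | zero =>
    by_cases h : [c].isPrefixOf (l.drop 0) = true
    · right
      refine ⟨0, ?_, le_refl 0, by simpa using (pvOnePrefix l c 0).mp h⟩
      simp [PySem.Chars.rfind.go, List.drop_zero] at h ⊢
      simp [h]
    · left
      constructor
      · simp only [PySem.Chars.rfind.go]
        rw [if_neg (by simpa using h)]
      · intro i hi
        interval_cases i
        intro hc
        exact h ((pvOnePrefix l c 0).mpr (by simpa using hc))
  | succ j ih =>
    by_cases h : [c].isPrefixOf (l.drop (j + 1)) = true
    · right
      refine ⟨j + 1, ?_, le_refl _, (pvOnePrefix l c (j + 1)).mp h⟩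
      simp only [PySem.Chars.rfind.go]
      rw [if_pos h]
    · have hgo : PySem.Chars.rfind.go l [c] (j + 1) = PySem.Chars.rfind.go l [c] j := by
        simp only [PySem.Chars.rfind.go]
        rw [if_neg h]
      have hnot : l[j + 1]? ≠ some c := fun hc => h ((pvOnePrefix l c (j + 1)).mpr hc)
      rcases ih with ⟨hneg, hall⟩ | ⟨r, hr, hle, hc⟩
      · left
        refine ⟨by rw [hgo]; exact hneg, ?_⟩
        intro i hi
        rcases Nat.lt_or_ge i (j + 1) with h' | h'
        · exact hall i (by omega)
        · have : i = j + 1 := by omega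
          subst this
          exact hnot
      · right
        exact ⟨r, by rw [hgo]; exact hr, by omega, hc⟩

-- the stack of B's loop over the prefix p, in B's end-on-top Int form, from the empty stack
lemma pvBStack_zero (p : List Char) :
    (PySem.List.enumerate p 0).foldl pvBStep []
      = ((pvStackOf p).2.reverse.map (fun x => (x : Int))) := by
  have h := pvBStack_eq p 0 []
  simpa [pvStackOf] using h

-- ===== VERDICT (by name: the statement is the Claim_ definition above) =====
theorem find_last_json_object_py_spec : Claim_equal_find_last_json_object_py := by
  intro text _
  unfold Spec_find_last_json_object_py
  have hrw : PySem.Str.rfind text "}" = PySem.Chars.rfind.go text.toList ['}'] text.toList.length := by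
    rw [PySem.Str.rfind_eq]
    rfl
  rcases pvRfindGo_spec text.toList '}' text.toList.length with ⟨hneg, _⟩ | ⟨r, hr, _, hrc⟩
  · rw [find_last_json_object_py, find_last_json_object_py_alt]
    rw [hrw, hneg]
    simp
  · have hrlt : r < text.toList.length := by
      rcases List.getElem?_eq_some_iff.mp hrc with ⟨h', _⟩
      exact h'
    have hrv : PySem.Str.rfind text "}" = (r : Int) := by rw [hrw, hr]
    have hne : ¬((r : Int) = -1) := by omega
    have hgetr : PySem.List.pyGet? text.toList ((r : Nat) : Int) = some '}' := by
      rw [PySem.List.pyGet?_natCast]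
      exact hrc
    rw [find_last_json_object_py, find_last_json_object_py_alt]
    rw [hrv]
    rw [if_neg hne, if_neg hne]
    rw [PySem.List.pyRange_neg_one_cons (by omega)]
    simp only [pvALoop, PySem.Str.pyGet?_eq, PySem.Chars.pyGet?_eq_listPyGet?, hgetr]
    have hpref : (PySem.Str.slice text none (some ((r : Nat) : Int))).toList
        = text.toList.take r := by
      simp [PySem.List.slice_to_natCast]
    rw [hpref, pvBStack_zero]
    by_cases hr0 : r = 0
    · subst hr0
      rw [show ((0 : Nat) : Int) - 1 = -1 from by norm_num,
        PySem.List.pyRange_neg_one_eq_nil (by norm_num)]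
      simp [pvALoop, pvStackOf]
    · have hcast : ((r : Nat) : Int) - 1 = (((r - 1 : Nat)) : Int) := by omega
      rw [hcast, pvALoop_eq text ((r : Nat) : Int) (r - 1) (0 + 1) (by norm_num) (by omega),
        show r - 1 + 1 = r from by omega,
        pvBackScanR_eq_stack ((text.toList.take r).reverse) (0 + 1) (by norm_num)]
      rw [List.reverse_reverse,
        show ((0 : Int) + 1 - 1).toNat = 0 from by norm_num]
      rcases hhead : (pvStackOf (text.toList.take r)).2 with _ | ⟨a, t⟩
      · simp
      · simp
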